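-- pv_equiv track=rewrite | github.com/auraoneai/agent-studio-open | vendor/agent-trace-card/src/agent_trace_card/generator.py | _retry_count
-- ===== SOURCE A (Python) =====
-- def _retry_count(tools: list[str]) -> int:
--     counts: dict[str, int] = {}
--     retries = 0
--     for tool in tools:
--         counts[tool] = counts.get(tool, 0) + 1
--         if counts[tool] > 1:
--             retries += 1
--     return retries
-- ===== SOURCE B (Python) =====
-- def _retry_count(tools: list[str]) -> int:
--     # Sort a copy so equal tool names become adjacent, then count adjacent
--     # equal pairs: each occurrence past the first of a name contributes
--     # exactly one such pair, so this equals the number of retries.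
--     s = sorted(tools)
--     retries = 0
--     for prev, cur in zip(s, s[1:]):
--         if cur == prev:
--             retries += 1
--     return retries
-- ===== Notes on version B (the rewrite author's own statement) =====
-- stated objective: alternative
-- what changed: Replaced the hash-counting single pass (dict of per-tool counts with a >1 branch) by sort-then-scan: sort the names so duplicates become adjacent and count adjacent equal pairs; no dict and no per-tool counters.
import Mathlib
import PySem

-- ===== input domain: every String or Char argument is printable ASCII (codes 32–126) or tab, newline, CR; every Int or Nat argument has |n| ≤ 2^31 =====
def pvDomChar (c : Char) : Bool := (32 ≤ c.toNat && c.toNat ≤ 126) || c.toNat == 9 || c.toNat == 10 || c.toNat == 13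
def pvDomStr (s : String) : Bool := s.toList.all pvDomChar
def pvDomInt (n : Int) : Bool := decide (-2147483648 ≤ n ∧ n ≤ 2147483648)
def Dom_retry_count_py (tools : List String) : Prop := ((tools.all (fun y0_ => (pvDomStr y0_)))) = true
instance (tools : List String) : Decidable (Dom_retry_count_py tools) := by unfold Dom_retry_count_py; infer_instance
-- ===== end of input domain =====

-- B replaces A's per-element counting dict and >1 branch by sort-then-scan:
-- sort the names and count adjacent equal pairs — objective: alternative.


-- ===== PORT A =====
def retry_count_py (tools : List String) : Int :=
  (tools.foldl
    (fun (st : PySem.Dict String Int × Int) tool =>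
      let counts := st.1.insert tool (st.1.getD tool 0 + 1)
      (counts, if counts.getD tool 0 > 1 then st.2 + 1 else st.2))
    (PySem.Dict.empty, 0)).2

-- ===== PORT B =====
def retry_count_py_alt (tools : List String) : Int :=
  let s := PySem.List.sorted tools (fun x => x) false
  ((s.zip (PySem.List.slice s (some 1) none)).foldl
    (fun (retries : Int) p => if p.2 = p.1 then retries + 1 else retries) 0)

-- ===== PRECONDITION & SPEC =====
def Spec_retry_count_py (tools : List String) (out : Int) : Prop := out = retry_count_py_alt tools
instance (tools : List String) (out : Int) : Decidable (Spec_retry_count_py tools out) := by unfold Spec_retry_count_py; infer_instance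

-- ===== CLAIM (what is proved, stated in full; the proofs are below) =====
def Claim_equal_retry_count_py : Prop := ∀ (tools : List String), Dom_retry_count_py tools → Spec_retry_count_py tools (retry_count_py tools)

-- ===== LEMMAS AND PROOFS =====

-- one step of A's dict update turns Counter(p) into Counter(p ++ [x])
theorem step_counter (p : List String) (x : String) :
    (PySem.Dict.counter p).insert x ((PySem.Dict.counter p).getD x 0 + 1)
      = PySem.Dict.counter (p ++ [x]) := by
  rw [← PySem.Dict.foldl_insert_getD_add_one_eq_counter,
      ← PySem.Dict.foldl_insert_getD_add_one_eq_counter, List.foldl_append]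
  rfl

-- A's loop invariant: with dict state Counter(p), the retries accumulator advances
-- by (elements of l) minus (distinct elements l adds beyond those of p)
theorem loop_inv (l p : List String) (r : Int) :
    (l.foldl
      (fun (st : PySem.Dict String Int × Int) tool =>
        let counts := st.1.insert tool (st.1.getD tool 0 + 1)
        (counts, if counts.getD tool 0 > 1 then st.2 + 1 else st.2))
      (PySem.Dict.counter p, r)).2
    = r + (l.length : Int)
        - ((PySem.Set.update (PySem.Set.ofList p) l).length : Int)
        + ((PySem.Set.ofList p).length : Int) := by
  induction l generalizing p r with
  | nil => simp [PySem.Set.update]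
  | cons x l ih =>
    simp only [List.foldl_cons]
    have hd := step_counter p x
    have hget : (PySem.Dict.counter (p ++ [x])).getD x 0 = ((p ++ [x]).count x : Int) :=
      PySem.Dict.getD_counter (p ++ [x]) x
    have hupd : PySem.Set.update (PySem.Set.ofList p) (x :: l)
        = PySem.Set.update (PySem.Set.ofList (p ++ [x])) l := by
      simp [PySem.Set.update, PySem.Set.ofList_append_singleton]
    by_cases hx : x ∈ p
    · have hcond : (PySem.Dict.counter (p ++ [x])).getD x 0 > 1 := by
        rw [hget]
        have : 0 < p.count x := List.count_pos_iff.mpr hx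
        simp [List.count_append]
        omega
      have hset : PySem.Set.ofList (p ++ [x]) = PySem.Set.ofList p := by
        rw [PySem.Set.ofList_append_singleton]
        have hmem : x ∈ PySem.Set.ofList p := (PySem.Set.mem_ofList p x).mpr hx
        simp [PySem.Set.add, PySem.Set.contains_eq_listContains, hmem]
      rw [hd, if_pos hcond, ih (p ++ [x]) (r + 1), hupd, hset]
      simp only [List.length_cons]
      push_cast
      ring
    · have hcond : ¬ (PySem.Dict.counter (p ++ [x])).getD x 0 > 1 := by
        rw [hget]
        have : p.count x = 0 := List.count_eq_zero.mpr hx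
        simp [List.count_append, this]
      have hset : PySem.Set.ofList (p ++ [x]) = PySem.Set.ofList p ++ [x] := by
        rw [PySem.Set.ofList_append_singleton]
        have : ¬ x ∈ PySem.Set.ofList p := fun h => hx ((PySem.Set.mem_ofList p x).mp h)
        simp [PySem.Set.add, PySem.Set.contains_eq_listContains, this]
      rw [hd, if_neg hcond, ih (p ++ [x]) r, hupd, hset]
      simp only [List.length_cons, List.length_append, List.length_nil]
      push_cast
      ring

-- distinct-count recursion: consing a either keeps |set| (a already present) or adds 1
theorem len_ofList_cons (a : String) (xs : List String) :
    ((PySem.Set.ofList (a :: xs)).length : Int)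
      = (if a ∈ xs then 0 else 1) + ((PySem.Set.ofList xs).length : Int) := by
  by_cases hx : a ∈ xs
  · have hperm : (PySem.Set.ofList (a :: xs)).Perm (PySem.Set.ofList xs) := by
      refine (List.perm_ext_iff_of_nodup (PySem.Set.nodup_ofList _) (PySem.Set.nodup_ofList _)).mpr ?_
      intro y
      rw [PySem.Set.mem_ofList, PySem.Set.mem_ofList, List.mem_cons]
      constructor
      · rintro (rfl | h) <;> [exact hx; exact h]
      · exact Or.inr
    simp [hx, hperm.length_eq]
  · have hperm : (PySem.Set.ofList (a :: xs)).Perm (a :: PySem.Set.ofList xs) := by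
      refine (List.perm_ext_iff_of_nodup (PySem.Set.nodup_ofList _) ?_).mpr ?_
      · exact List.nodup_cons.mpr ⟨fun h => hx ((PySem.Set.mem_ofList xs a).mp h),
          PySem.Set.nodup_ofList _⟩
      · intro y
        rw [PySem.Set.mem_ofList, List.mem_cons, List.mem_cons, PySem.Set.mem_ofList]
    simp [hx, hperm.length_eq]
    omega

-- B's scan on a ≤-ordered list counts length-minus-distinct
theorem adj_count_sorted (l : List String) (hp : l.Pairwise (· ≤ ·)) (r : Int) :
    (l.zip l.tail).foldl (fun (retries : Int) p => if p.2 = p.1 then retries + 1 else retries) r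
      = r + (l.length : Int) - ((PySem.Set.ofList l).length : Int) := by
  induction l generalizing r with
  | nil => simp [PySem.Set.ofList]
  | cons a l ih =>
    cases l with
    | nil =>
      have : (PySem.Set.ofList [a]).length = 1 := rfl
      simp [this]
    | cons b t =>
      have hp' : (b :: t).Pairwise (· ≤ ·) := hp.tail
      have hab : a ≤ b := (List.pairwise_cons.mp hp).1 b (List.mem_cons_self)
      simp only [List.tail_cons, List.zip_cons_cons, List.foldl_cons]
      have ih' := fun r => ih hp' r
      simp only [List.tail_cons] at ih'
      by_cases hba : b = a
      · subst hba
        rw [if_pos rfl, ih' (r + 1)]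
        have h1 : ((PySem.Set.ofList (b :: b :: t)).length : Int)
            = ((PySem.Set.ofList (b :: t)).length : Int) := by
          rw [len_ofList_cons]
          simp
        rw [h1]
        simp only [List.length_cons]
        push_cast
        ring
      · rw [if_neg hba, ih' r]
        have hat : a ∉ b :: t := by
          intro hmem
          rcases List.mem_cons.mp hmem with h | h
          · exact hba h.symm
          · have hba' : b ≤ a := (List.pairwise_cons.mp hp').1 a h
            exact hba (le_antisymm hba' hab)
        have h2 : ((PySem.Set.ofList (a :: b :: t)).length : Int)
            = 1 + ((PySem.Set.ofList (b :: t)).length : Int) := by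
          rw [len_ofList_cons]
          simp [hat]
        rw [h2]
        simp only [List.length_cons]
        push_cast
        ring

-- ===== VERDICT (by name: the statement is the Claim_ definition above) =====
theorem retry_count_py_spec : Claim_equal_retry_count_py := by
  intro tools _
  show retry_count_py tools = retry_count_py_alt tools
  -- A = len - |set tools|
  have hA := loop_inv tools [] 0
  have he : PySem.Dict.counter ([] : List String) = PySem.Dict.empty := rfl
  rw [he] at hA
  have hupd : PySem.Set.update (PySem.Set.ofList ([] : List String)) tools
      = PySem.Set.ofList tools := by
    simp [PySem.Set.update, PySem.Set.ofList_eq_foldl]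
  rw [hupd] at hA
  -- B = len(sorted) - |set (sorted tools)| = len - |set tools|
  set s := PySem.List.sorted tools (fun x => x) false with hs
  have hB := adj_count_sorted s (by simpa using PySem.List.sorted_pairwise tools (fun x => x)) 0
  have hlen : s.length = tools.length := PySem.List.length_sorted ..
  have hsetperm : (PySem.Set.ofList s).Perm (PySem.Set.ofList tools) := by
    refine (List.perm_ext_iff_of_nodup (PySem.Set.nodup_ofList _) (PySem.Set.nodup_ofList _)).mpr ?_
    intro y
    rw [PySem.Set.mem_ofList, PySem.Set.mem_ofList, PySem.List.mem_sorted]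
  unfold retry_count_py retry_count_py_alt
  rw [hA]
  simp only [← hs, PySem.List.slice_from_one]
  rw [hB, hlen, hsetperm.length_eq]
  have hnil : (PySem.Set.ofList ([] : List String)).length = 0 := rfl
  rw [hnil]
  ring
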